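-- pv_equiv track=rewrite | github.com/YuvalDellus/IntroToCS | ex4/hangman.py | choose_letter
-- ===== SOURCE A (Python) =====
-- LETTER_PLACE = 1
--
-- def choose_letter(words, pattern):
--     """gives the most frequent letter as a hint"""
--     frequency = {}
--     reverse_frequency_list = list()
--     for word in words:
--         for letter in word:
--             if letter not in pattern:
--                 if letter not in frequency:
--                     frequency[str(letter)] = 1
--                 else:
--                     frequency[str(letter)] += 1
--
--     for letter in frequency:
--         # switching key and value in the dic to be able using the max function
--         reverse_frequency_list.append((frequency[letter], letter))
--
--     hint_letter = max(reverse_frequency_list)[LETTER_PLACE]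
--     # getting list of tuples, want the letter data out of it
--
--     return hint_letter
-- ===== SOURCE B (Python) =====
-- def choose_letter(words, pattern):
--     """gives the most frequent letter as a hint"""
--     letters = sorted(c for w in words for c in w if c not in pattern)
--     if not letters:
--         raise ValueError("no letter left to hint")
--     best, best_n = letters[0], 0
--     cur, cur_n = letters[0], 0
--     for c in letters:
--         if c == cur:
--             cur_n += 1
--         else:
--             cur, cur_n = c, 1
--         if cur_n >= best_n:
--             best, best_n = cur, cur_n
--     return best
-- ===== Notes on version B (the rewrite author's own statement) =====
-- stated objective: alternative
-- what changed: Replaces A's dict-counting pass plus key/value-swapped tuple list fed to max() by sorting the non-pattern letters and doing one linear run-length scan over the sorted list that keeps the best (longest, and on ties the later = larger) run, with no dictionary and no max() call.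
import Mathlib
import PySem

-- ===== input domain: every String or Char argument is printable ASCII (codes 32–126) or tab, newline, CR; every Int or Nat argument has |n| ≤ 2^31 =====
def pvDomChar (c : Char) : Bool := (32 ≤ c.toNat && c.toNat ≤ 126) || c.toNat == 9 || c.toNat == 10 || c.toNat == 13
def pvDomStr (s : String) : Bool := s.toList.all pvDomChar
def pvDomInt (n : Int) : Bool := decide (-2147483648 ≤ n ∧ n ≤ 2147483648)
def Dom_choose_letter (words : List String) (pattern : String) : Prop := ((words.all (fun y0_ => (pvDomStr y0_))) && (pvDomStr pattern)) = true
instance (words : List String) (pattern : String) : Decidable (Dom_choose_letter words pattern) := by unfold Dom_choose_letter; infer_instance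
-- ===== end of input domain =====

-- B sorts the non-pattern letters and finds the hint by a single run-length scan over the sorted list
-- (keeping the best run, ties to the later = larger letter) — no dictionary and no max() call.

-- ===== PORT A =====
-- LETTER_PLACE = 1  →  the .2 projection below
def choose_letter (words : List String) (pattern : String) : String :=
  -- frequency = {}; for word in words: for letter in word: …
  let frequency : PySem.Dict Char Int :=
    words.foldl (fun d word =>
      word.toList.foldl (fun d letter =>
        if !(PySem.Chars.isIn [letter] pattern.toList) then   -- if letter not in pattern
          if !(d.contains letter) then d.insert letter 1       -- frequency[str(letter)] = 1
          else d.modify letter 0 (· + 1)                       -- frequency[str(letter)] += 1 (key present: exact)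
        else d) d) PySem.Dict.empty
  -- for letter in frequency: reverse_frequency_list.append((frequency[letter], letter))
  -- frequency[letter] is ported as getD letter 0: letter ranges over the keys, so the lookup never fails
  let reverse_frequency_list : List (Int × Char) :=
    frequency.keys.foldl (fun acc letter => acc ++ [(frequency.getD letter 0, letter)]) []
  -- hint_letter = max(reverse_frequency_list)[LETTER_PLACE]; max() on [] raises ValueError → outside Pre_
  match PySem.List.max2? reverse_frequency_list Prod.fst Prod.snd with
  | some m => String.ofList [m.2]
  | none => ""

-- ===== PORT B =====
-- the body of B's for loop: advance/extend the current run, then update the best run if not shorter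
def pvStepB (s : Char × Int × Char × Int) (c : Char) : Char × Int × Char × Int :=
  let cur' := if c == s.2.2.1 then s.2.2.1 else c
  let cur_n' := if c == s.2.2.1 then s.2.2.2 + 1 else 1
  if cur_n' ≥ s.2.1 then (cur', cur_n', cur', cur_n') else (s.1, s.2.1, cur', cur_n')

def choose_letter_alt (words : List String) (pattern : String) : String :=
  -- letters = sorted(c for w in words for c in w if c not in pattern)
  let letters : List Char :=
    PySem.List.sorted ((words.flatMap String.toList).filter
      (fun c => !(PySem.Chars.isIn [c] pattern.toList))) (fun c => c) false
  match letters with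
  | [] => ""          -- if not letters: raise ValueError → outside Pre_
  | l0 :: _ =>
    -- best, best_n = letters[0], 0 ; cur, cur_n = letters[0], 0 ; for c in letters: …
    let st := letters.foldl pvStepB (l0, 0, l0, 0)
    String.ofList [st.1]  -- return best

-- ===== PRECONDITION & SPEC =====
-- Pre_ excludes exactly the inputs where no letter outside the pattern exists: there both
-- Pythons raise ValueError (A: max() of an empty sequence; B: its explicit raise).
def Pre_choose_letter (words : List String) (pattern : String) : Prop :=
  (words.flatMap String.toList).any (fun c => !(PySem.Chars.isIn [c] pattern.toList)) = true
instance (words : List String) (pattern : String) : Decidable (Pre_choose_letter words pattern) := by unfold Pre_choose_letter; infer_instance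
def pvWitness_choose_letter : List String × String := (["abba", "cc"], "x")

def Spec_choose_letter (words : List String) (pattern : String) (out : String) : Prop := out = choose_letter_alt words pattern
instance (words : List String) (pattern : String) (out : String) : Decidable (Spec_choose_letter words pattern out) := by unfold Spec_choose_letter; infer_instance

-- ===== CLAIM (what is proved, stated in full; the proofs are below) =====
def Claim_equal_choose_letter : Prop := ∀ (words : List String) (pattern : String), Dom_choose_letter words pattern → Pre_choose_letter words pattern → Spec_choose_letter words pattern (choose_letter words pattern)

-- ===== LEMMAS AND PROOFS =====

theorem getD_of_not_contains {κ ν : Type} [BEq κ] (d : PySem.Dict κ ν) (k : κ) (v : ν)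
    (h : d.contains k = false) : d.getD k v = v := by
  have : d.items.find? (fun p => p.1 == k) = none := by
    rw [List.find?_eq_none]
    intro p hp
    simp only [PySem.Dict.contains, List.any_eq_false] at h
    exact h p hp
  simp [PySem.Dict.getD, PySem.Dict.get?, this]

-- A's counting step is exactly the Counter step on letters outside the pattern
theorem stepA_eq (pattern : String) (d : PySem.Dict Char Int) (c : Char) :
    (if !(PySem.Chars.isIn [c] pattern.toList) then
       if !(d.contains c) then d.insert c 1 else d.modify c 0 (· + 1)
     else d)
    = (if !(PySem.Chars.isIn [c] pattern.toList) then d.modify c 0 (· + 1) else d) := by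
  by_cases h : PySem.Chars.isIn [c] pattern.toList = true
  · simp [h]
  · rw [Bool.not_eq_true] at h
    by_cases hc : d.contains c = true
    · simp [h, hc]
    · rw [Bool.not_eq_true] at hc
      simp [h, hc, PySem.Dict.modify, getD_of_not_contains d c 0 hc]

-- A's reverse_frequency_list is the (count, letter) pairs over the deduped filtered letters
theorem lists_eq (words : List String) (pattern : String) :
    ((words.foldl (fun d word =>
        word.toList.foldl (fun d letter =>
          if !(PySem.Chars.isIn [letter] pattern.toList) then
            if !(d.contains letter) then d.insert letter 1
            else d.modify letter 0 (· + 1)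
          else d) d) (PySem.Dict.empty : PySem.Dict Char Int)).keys.foldl (fun acc letter =>
        acc ++ [((words.foldl (fun d word =>
        word.toList.foldl (fun d letter =>
          if !(PySem.Chars.isIn [letter] pattern.toList) then
            if !(d.contains letter) then d.insert letter 1
            else d.modify letter 0 (· + 1)
          else d) d) (PySem.Dict.empty : PySem.Dict Char Int)).getD letter 0, letter)]) [])
    = (PySem.List.dedup ((words.flatMap String.toList).filter
          (fun c => !(PySem.Chars.isIn [c] pattern.toList)))).map
        (fun c => ((((words.flatMap String.toList).filter
          (fun c => !(PySem.Chars.isIn [c] pattern.toList))).count c : Int), c)) := by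
  have hfreq : (words.foldl (fun d word =>
      word.toList.foldl (fun d letter =>
        if !(PySem.Chars.isIn [letter] pattern.toList) then
          if !(d.contains letter) then d.insert letter 1
          else d.modify letter 0 (· + 1)
        else d) d) (PySem.Dict.empty : PySem.Dict Char Int))
      = PySem.Dict.counter ((words.flatMap String.toList).filter
          (fun c => !(PySem.Chars.isIn [c] pattern.toList))) := by
    calc words.foldl (fun d word =>
          word.toList.foldl (fun d letter =>
            if !(PySem.Chars.isIn [letter] pattern.toList) then
              if !(d.contains letter) then d.insert letter 1
              else d.modify letter 0 (· + 1)
            else d) d) (PySem.Dict.empty : PySem.Dict Char Int)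
        = words.foldl (fun d word =>
            word.toList.foldl (fun d letter =>
              if !(PySem.Chars.isIn [letter] pattern.toList) then d.modify letter 0 (· + 1)
              else d) d) (PySem.Dict.empty : PySem.Dict Char Int) := by
          apply PySem.List.foldl_congr_mem
          intro acc w _
          apply PySem.List.foldl_congr_mem
          intro a x _
          exact stepA_eq pattern a x
      _ = (words.flatMap String.toList).foldl (fun d letter =>
            if !(PySem.Chars.isIn [letter] pattern.toList) then d.modify letter 0 (· + 1)
            else d) (PySem.Dict.empty : PySem.Dict Char Int) := by
          rw [List.flatMap_def, List.foldl_flatten, List.foldl_map]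
      _ = ((words.flatMap String.toList).filter
            (fun c => !(PySem.Chars.isIn [c] pattern.toList))).foldl
            (fun d letter => d.modify letter 0 (· + 1)) (PySem.Dict.empty : PySem.Dict Char Int) := by
          rw [PySem.List.foldl_if_eq_foldl_filter]
      _ = PySem.Dict.counter ((words.flatMap String.toList).filter
            (fun c => !(PySem.Chars.isIn [c] pattern.toList))) := by
          rw [PySem.Dict.counter_eq_foldl]
  simp only [hfreq]
  rw [PySem.List.foldl_append_singleton_eq_map, List.nil_append, PySem.Dict.keys_counter,
    ← PySem.List.dedup_eq_ofList]
  apply List.map_congr_left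
  intro c hc
  rw [PySem.Dict.getD_counter]

-- lexicographic (count, letter) dominance: Python's tuple order "y <= m"
def pvLexLE (y m : Int × Char) : Prop := y.1 < m.1 ∨ (y.1 = m.1 ∧ y.2 ≤ m.2)

theorem pvLexLE_refl (a : Int × Char) : pvLexLE a a := Or.inr ⟨rfl, le_refl _⟩

theorem pvLexLE_trans {a b c : Int × Char} (h1 : pvLexLE a b) (h2 : pvLexLE b c) : pvLexLE a c := by
  rcases h1 with h1 | ⟨h1, h1'⟩ <;> rcases h2 with h2 | ⟨h2, h2'⟩
  · exact Or.inl (lt_trans h1 h2)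
  · exact Or.inl (h2 ▸ h1)
  · exact Or.inl (h1 ▸ h2)
  · exact Or.inr ⟨h1.trans h2, le_trans h1' h2'⟩

theorem pvLexLE_antisymm {a b : Int × Char} (h1 : pvLexLE a b) (h2 : pvLexLE b a) : a = b := by
  rcases h1 with h1 | ⟨h1, h1'⟩ <;> rcases h2 with h2 | ⟨h2, h2'⟩
  · exact absurd h2 (by omega)
  · exact absurd h1 (by omega)
  · exact absurd h2 (by omega)
  · exact Prod.ext h1 (le_antisymm h1' h2')

-- the comparison step inside PySem.List.max2? on (fst, snd) tuple keys
def pvMaxStep (acc : Option (Int × Char)) (x : Int × Char) : Option (Int × Char) :=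
  match acc with
  | none => some x
  | some m =>
    if (decide (m.1 < x.1) || (!decide (x.1 < m.1) && decide (m.2 < x.2))) = true
    then some x else some m

theorem max2?_eq_fold (l : List (Int × Char)) :
    PySem.List.max2? l Prod.fst Prod.snd = l.foldl pvMaxStep none := by
  simp only [PySem.List.max2?]
  congr 1
  funext acc x
  cases acc <;> rfl

theorem fold_pvMaxStep_some (t : List (Int × Char)) :
    ∀ m0 : Int × Char, ∃ r, t.foldl pvMaxStep (some m0) = some r := by
  induction t with
  | nil => intro m0; exact ⟨m0, rfl⟩
  | cons x t ih =>
    intro m0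
    simp only [List.foldl_cons]
    by_cases hc : (decide (m0.1 < x.1) || (!decide (x.1 < m0.1) && decide (m0.2 < x.2))) = true
    · have : pvMaxStep (some m0) x = some x := by simp [pvMaxStep, hc]
      rw [this]; exact ih x
    · have : pvMaxStep (some m0) x = some m0 := by simp [pvMaxStep, hc]
      rw [this]; exact ih m0

theorem fold_pvMaxStep_isMax (t : List (Int × Char)) :
    ∀ (m0 r : Int × Char), t.foldl pvMaxStep (some m0) = some r →
      (r = m0 ∨ r ∈ t) ∧ pvLexLE m0 r ∧ ∀ y ∈ t, pvLexLE y r := by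
  induction t with
  | nil =>
    intro m0 r h
    simp only [List.foldl_nil, Option.some.injEq] at h
    subst h
    exact ⟨Or.inl rfl, pvLexLE_refl _, by simp⟩
  | cons x t ih =>
    intro m0 r h
    simp only [List.foldl_cons] at h
    have hstep : ∃ m1, pvMaxStep (some m0) x = some m1 ∧ pvLexLE m0 m1 ∧ pvLexLE x m1 ∧ (m1 = m0 ∨ m1 = x) := by
      by_cases hc : (decide (m0.1 < x.1) || (!decide (x.1 < m0.1) && decide (m0.2 < x.2))) = true
      · refine ⟨x, by simp [pvMaxStep, hc], ?_, pvLexLE_refl _, Or.inr rfl⟩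
        by_cases h1 : m0.1 < x.1
        · exact Or.inl h1
        · simp only [Bool.or_eq_true, Bool.and_eq_true, Bool.not_eq_true', decide_eq_true_eq,
            decide_eq_false_iff_not] at hc
          rcases hc with hc | ⟨hc1, hc2⟩
          · exact Or.inl hc
          · exact Or.inr ⟨by omega, le_of_lt hc2⟩
      · refine ⟨m0, by simp [pvMaxStep, hc], pvLexLE_refl _, ?_, Or.inl rfl⟩
        simp only [Bool.or_eq_true, Bool.and_eq_true, Bool.not_eq_true', decide_eq_true_eq,
          decide_eq_false_iff_not, not_or, not_and] at hc
        obtain ⟨hc1, hc2⟩ := hc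
        by_cases h1 : x.1 < m0.1
        · exact Or.inl h1
        · have := hc2 (by simpa using h1)
          exact Or.inr ⟨by omega, by simpa using this⟩
    obtain ⟨m1, hm1, hle0, hlex, hcase⟩ := hstep
    rw [hm1] at h
    obtain ⟨hmem, hle1, hall⟩ := ih m1 r h
    refine ⟨?_, pvLexLE_trans hle0 hle1, ?_⟩
    · rcases hmem with rfl | hr
      · rcases hcase with rfl | rfl
        · exact Or.inl rfl
        · exact Or.inr List.mem_cons_self
      · exact Or.inr (List.mem_cons_of_mem _ hr)
    · intro y hy
      rcases List.mem_cons.mp hy with rfl | hy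
      · exact pvLexLE_trans hlex hle1
      · exact hall y hy

theorem max2?_isMaxLex (l : List (Int × Char)) (r : Int × Char)
    (h : PySem.List.max2? l Prod.fst Prod.snd = some r) :
    r ∈ l ∧ ∀ y ∈ l, pvLexLE y r := by
  rw [max2?_eq_fold] at h
  cases l with
  | nil => simp at h
  | cons h0 t =>
    simp only [List.foldl_cons] at h
    have h0step : pvMaxStep none h0 = some h0 := rfl
    rw [h0step] at h
    obtain ⟨hmem, hle0, hall⟩ := fold_pvMaxStep_isMax t h0 r h
    refine ⟨?_, ?_⟩
    · rcases hmem with rfl | hr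
      · exact List.mem_cons_self
      · exact List.mem_cons_of_mem _ hr
    · intro y hy
      rcases List.mem_cons.mp hy with rfl | hy
      · exact hle0
      · exact hall y hy

theorem max2?_some_of_ne_nil (l : List (Int × Char)) (hl : l ≠ []) :
    ∃ r, PySem.List.max2? l Prod.fst Prod.snd = some r := by
  rw [max2?_eq_fold]
  cases l with
  | nil => exact absurd rfl hl
  | cons h0 t =>
    simp only [List.foldl_cons]
    have h0step : pvMaxStep none h0 = some h0 := rfl
    rw [h0step]
    exact fold_pvMaxStep_some t h0

-- the invariant of B's scan: after processing a prefix P (state s = (best, best_n, cur, cur_n)):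
-- cur is the maximum of P with cur_n its multiplicity, best realises the maximal multiplicity
-- and is the largest letter doing so
def pvInv (P : List Char) (s : Char × Int × Char × Int) : Prop :=
  (∀ x ∈ P, x ≤ s.2.2.1) ∧ s.2.2.1 ∈ P ∧ s.2.2.2 = (P.count s.2.2.1 : Int) ∧
  s.1 ∈ P ∧ (P.count s.1 : Int) = s.2.1 ∧
  (∀ d ∈ P, (P.count d : Int) ≤ s.2.1) ∧ (∀ d ∈ P, (P.count d : Int) = s.2.1 → d ≤ s.1)

theorem count_append_singleton (P : List Char) (c d : Char) :
    (P ++ [c]).count d = P.count d + (if d = c then 1 else 0) := by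
  rcases eq_or_ne d c with rfl | hd
  · simp [List.count_append]
  · simp [List.count_append, hd, Ne.symm hd]

theorem pvInv_step (P : List Char) (c : Char) (s : Char × Int × Char × Int)
    (hle : ∀ x ∈ P, x ≤ c) (h : pvInv P s) : pvInv (P ++ [c]) (pvStepB s c) := by
  obtain ⟨best, best_n, cur, cur_n⟩ := s
  obtain ⟨hcurmax, hcurmem, hcurcnt, hbmem, hbcnt, hmax, htie⟩ := h
  simp only at hcurmax hcurmem hcurcnt hbmem hbcnt hmax htie
  have hmem' : ∀ d ∈ P ++ [c], d ∈ P ∨ d = c := by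
    intro d hd
    rcases List.mem_append.mp hd with h | h
    · exact Or.inl h
    · simp at h; exact Or.inr h
  have hle' : ∀ x ∈ P ++ [c], x ≤ c := by
    intro x hx
    rcases hmem' x hx with h | h
    · exact hle x h
    · exact le_of_eq h
  by_cases hc : c = cur
  · -- run continues: cur stays, its count grows by one
    subst hc
    have hcnt_c : ((P ++ [c]).count c : Int) = cur_n + 1 := by
      rw [count_append_singleton]
      simp
      omega
    have hcnt_ne : ∀ d, d ≠ c → (P ++ [c]).count d = P.count d := by
      intro d hd; rw [count_append_singleton]; simp [hd]
    by_cases hge : cur_n + 1 ≥ best_n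
    · have hstep : pvStepB (best, best_n, c, cur_n) c = (c, cur_n + 1, c, cur_n + 1) := by
        simp only [pvStepB, beq_self_eq_true, if_true]
        rw [if_pos hge]
      rw [hstep]
      dsimp only [pvInv]
      refine ⟨hle', by simp, by rw [hcnt_c], by simp, by rw [hcnt_c], ?_, ?_⟩
      · intro d hd
        by_cases hdc : d = c
        · subst hdc; rw [hcnt_c]
        · rw [hcnt_ne d hdc]
          have hdP : d ∈ P := (hmem' d hd).resolve_right hdc
          have := hmax d hdP
          omega
      · intro d hd _
        rcases hmem' d hd with hdP | hdc
        · exact hcurmax d hdP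
        · exact le_of_eq hdc
    · have hstep : pvStepB (best, best_n, c, cur_n) c = (best, best_n, c, cur_n + 1) := by
        simp only [pvStepB, beq_self_eq_true, if_true]
        rw [if_neg (by omega)]
      rw [hstep]
      dsimp only [pvInv]
      have hbc : best ≠ c := by
        intro hbc; subst hbc; omega
      refine ⟨hle', by simp, by rw [hcnt_c], List.mem_append_left _ hbmem,
        by rw [hcnt_ne best hbc]; exact hbcnt, ?_, ?_⟩
      · intro d hd
        by_cases hdc : d = c
        · subst hdc; rw [hcnt_c]; omega
        · rw [hcnt_ne d hdc]
          exact hmax d ((hmem' d hd).resolve_right hdc)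
      · intro d hd hcnt
        by_cases hdc : d = c
        · subst hdc; rw [hcnt_c] at hcnt; omega
        · rw [hcnt_ne d hdc] at hcnt
          exact htie d ((hmem' d hd).resolve_right hdc) hcnt
  · -- new (strictly larger) letter starts a run of length one
    have hcP : c ∉ P := by
      intro hcp
      exact hc (le_antisymm (hcurmax c hcp) (hle cur hcurmem))
    have hcnt_c : ((P ++ [c]).count c : Int) = 1 := by
      rw [count_append_singleton]
      simp [List.count_eq_zero_of_not_mem hcP]
    have hcnt_ne : ∀ d, d ≠ c → (P ++ [c]).count d = P.count d := by
      intro d hd; rw [count_append_singleton]; simp [hd]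
    have hbge1 : (1 : Int) ≤ best_n := by
      have := List.count_pos_iff.mpr hbmem
      omega
    have hbne : (c == cur) = false := by simp [hc]
    by_cases hge : (1 : Int) ≥ best_n
    · have hstep : pvStepB (best, best_n, cur, cur_n) c = (c, 1, c, 1) := by
        simp only [pvStepB, hbne, Bool.false_eq_true, if_false]
        rw [if_pos hge]
      rw [hstep]
      dsimp only [pvInv]
      refine ⟨hle', by simp, by rw [hcnt_c], by simp, by rw [hcnt_c], ?_, ?_⟩
      · intro d hd
        by_cases hdc : d = c
        · subst hdc; rw [hcnt_c]
        · rw [hcnt_ne d hdc]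
          have := hmax d ((hmem' d hd).resolve_right hdc)
          omega
      · intro d hd _
        exact hle' d hd
    · have hstep : pvStepB (best, best_n, cur, cur_n) c = (best, best_n, c, 1) := by
        simp only [pvStepB, hbne, Bool.false_eq_true, if_false]
        rw [if_neg hge]
      rw [hstep]
      dsimp only [pvInv]
      have hbc : best ≠ c := fun hbc => hcP (hbc ▸ hbmem)
      refine ⟨hle', by simp, by rw [hcnt_c], List.mem_append_left _ hbmem,
        by rw [hcnt_ne best hbc]; exact hbcnt, ?_, ?_⟩
      · intro d hd
        by_cases hdc : d = c
        · subst hdc; rw [hcnt_c]; omega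
        · rw [hcnt_ne d hdc]
          exact hmax d ((hmem' d hd).resolve_right hdc)
      · intro d hd hcnt
        by_cases hdc : d = c
        · subst hdc; rw [hcnt_c] at hcnt; omega
        · rw [hcnt_ne d hdc] at hcnt
          exact htie d ((hmem' d hd).resolve_right hdc) hcnt

theorem pvInv_fold (rest : List Char) :
    ∀ (P : List Char) (s : Char × Int × Char × Int),
      (P ++ rest).Pairwise (· ≤ ·) → pvInv P s → pvInv (P ++ rest) (rest.foldl pvStepB s) := by
  induction rest with
  | nil => intro P s _ h; simpa using h
  | cons x t ih =>
    intro P s hpw hinv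
    have hle : ∀ y ∈ P, y ≤ x := by
      intro y hy
      exact (List.pairwise_append.mp hpw).2.2 y hy x List.mem_cons_self
    have hstep := pvInv_step P x s hle hinv
    have hassoc : P ++ x :: t = (P ++ [x]) ++ t := by simp
    rw [hassoc] at hpw ⊢
    exact ih (P ++ [x]) (pvStepB s x) hpw hstep

-- core equality, stated over the filtered letter list lf
theorem main_core (lf : List Char) (hlf : lf ≠ []) :
    (match PySem.List.max2? ((PySem.List.dedup lf).map (fun c => ((lf.count c : Int), c)))
        Prod.fst Prod.snd with
     | some m => String.ofList [m.2]
     | none => "") =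
    (match PySem.List.sorted lf (fun c => c) false with
     | [] => ""
     | l0 :: _ =>
       String.ofList [((PySem.List.sorted lf (fun c => c) false).foldl pvStepB (l0, 0, l0, 0)).1]) := by
  obtain ⟨l0, t, hL⟩ := List.exists_cons_of_ne_nil
    (fun h => hlf ((PySem.List.sorted_eq_nil_iff _ _ _).mp h) : PySem.List.sorted lf (fun c => c) false ≠ [])
  have hperm : (PySem.List.sorted lf (fun c => c) false).Perm lf := PySem.List.sorted_perm lf _ false
  have hcount : ∀ d : Char, (PySem.List.sorted lf (fun c => c) false).count d = lf.count d :=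
    fun d => hperm.count_eq d
  -- the scan invariant on the whole sorted list
  have hpw : ((PySem.List.sorted lf (fun c => c) false)).Pairwise (· ≤ ·) := by
    have := PySem.List.sorted_pairwise lf (fun c => c) (κ := Char)
    simpa using this
  have hstep0 : pvStepB (l0, 0, l0, 0) l0 = (l0, 1, l0, 1) := by
    norm_num [pvStepB]
  have hinv0 : pvInv [l0] (l0, 1, l0, 1) := by
    refine ⟨?_, by simp, by simp, by simp, by simp, ?_, ?_⟩
    · intro x hx; simp at hx; exact le_of_eq hx
    · intro d hd; simp at hd; subst hd; simp
    · intro d hd _; simp at hd; exact le_of_eq hd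
  have hinv : pvInv (PySem.List.sorted lf (fun c => c) false)
      ((PySem.List.sorted lf (fun c => c) false).foldl pvStepB (l0, 0, l0, 0)) := by
    rw [hL, List.foldl_cons, hstep0]
    have hpw' : (([l0] ++ t)).Pairwise (· ≤ ·) := by rw [hL] at hpw; simpa using hpw
    have := pvInv_fold t [l0] (l0, 1, l0, 1) hpw' hinv0
    simpa using this
  set st := (PySem.List.sorted lf (fun c => c) false).foldl pvStepB (l0, 0, l0, 0) with hst
  obtain ⟨-, -, -, hbmemL, hbcnt, hmaxL, htieL⟩ := hinv
  -- the max2? side returns exactly (count of st.1, st.1)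
  have hMne : (PySem.List.dedup lf).map (fun c => ((lf.count c : Int), c)) ≠ [] := by
    obtain ⟨x, hx⟩ := List.exists_mem_of_ne_nil lf hlf
    have : x ∈ PySem.List.dedup lf := (PySem.List.mem_dedup _ _).mpr hx
    intro h
    rw [List.map_eq_nil_iff] at h
    rw [h] at this
    simp at this
  obtain ⟨r, hr⟩ := max2?_some_of_ne_nil _ hMne
  obtain ⟨hrmem, hrdom⟩ := max2?_isMaxLex _ r hr
  have hdomP : ∀ y ∈ (PySem.List.dedup lf).map (fun c => ((lf.count c : Int), c)),
      pvLexLE y ((lf.count st.1 : Int), st.1) := by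
    intro y hy
    obtain ⟨d, hd, rfl⟩ := List.mem_map.mp hy
    have hdL : d ∈ PySem.List.sorted lf (fun c => c) false :=
      hperm.mem_iff.mpr ((PySem.List.mem_dedup _ _).mp hd)
    have h1 : ((PySem.List.sorted lf (fun c => c) false).count d : Int) ≤ st.2.1 := hmaxL d hdL
    have h2 : ((PySem.List.sorted lf (fun c => c) false).count st.1 : Int) = st.2.1 := hbcnt
    rw [hcount] at h1 h2
    rcases lt_or_eq_of_le h1 with hlt | heq
    · exact Or.inl (by omega)
    · refine Or.inr ⟨by omega, ?_⟩
      apply htieL d hdL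
      rw [hcount]
      omega
  have hPmem : ((lf.count st.1 : Int), st.1) ∈ (PySem.List.dedup lf).map (fun c => ((lf.count c : Int), c)) :=
    List.mem_map.mpr ⟨st.1, (PySem.List.mem_dedup _ _).mpr (hperm.subset hbmemL), rfl⟩
  have hreq : r = ((lf.count st.1 : Int), st.1) :=
    pvLexLE_antisymm (hdomP r hrmem) (hrdom _ hPmem)
  rw [hr, hL]
  dsimp only
  rw [hreq, ← hL]

-- ===== VERDICT (by name: the statement is the Claim_ definition above) =====
theorem choose_letter_spec : Claim_equal_choose_letter := by
  intro words pattern _ hpre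
  show choose_letter words pattern = choose_letter_alt words pattern
  have hlf : ((words.flatMap String.toList).filter
      (fun c => !(PySem.Chars.isIn [c] pattern.toList))) ≠ [] := by
    obtain ⟨c, hc, hcp⟩ := List.any_eq_true.mp hpre
    intro h
    have hmem : c ∈ (words.flatMap String.toList).filter
        (fun c => !(PySem.Chars.isIn [c] pattern.toList)) := List.mem_filter.mpr ⟨hc, hcp⟩
    rw [h] at hmem
    simp at hmem
  simp only [choose_letter, choose_letter_alt]
  rw [lists_eq]
  exact main_core _ hlf
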